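-- pv_equiv track=rewrite | github.com/rc092444/hw | H24091299_HW0/新增資料夾/hw0_p1.py | dicaaa
-- ===== SOURCE A (Python) =====
-- def dicaaa(x):
--     def a(x):
--         c=""
--         if "^" in x:
--             lst=[]
--             for pos,char in enumerate(x):
--                 if(char == "^"):
--                     lst.append(pos)
--             for i in lst:
--                 m=i
--                 while m+1<len(x):
--                     if x[m+1].isdigit():
--                         m=m+1
--                     else:
--                         break
--                 dig=int(x[i+1:m+1])
--                 for aaa in range(dig):
--                     c=c+x[i-1]
--             for i in range(len(x)):
--                 tf=False
--                 if i+1==len(x):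
--                     tf=True
--                 elif x[i+1]!="^":
--                     tf=True
--
--                 if x[i].isalpha() and tf:
--                     c=c+x[i]
--
--             x=c
--         return(x)
--     dic={}
--     sss=""
--     x=a(x)
--     a=set(x)
--     for i in a:
--         dic[i]=0
--         for b in x:
--             if b==i:
--                 dic[i]=dic[i]+1
--     for i in a:
--         if dic[i]==1:
--             sss=sss+i
--         else:
--             sss=sss+i+"^"+str(dic[i])
--     return dic
-- ===== SOURCE B (Python) =====
-- def dicaaa(x):
--     # Same counts as A, but tallied directly into a dict: no expanded string is
--     # ever built (a whole digit run adds to one count in O(1)) and no per-key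
--     # rescan of the expanded text is done.
--     counts = {}
--     if "^" in x:
--         n = len(x)
--         for i, ch in enumerate(x):
--             if ch == "^":
--                 j = i + 1
--                 while j < n and x[j].isdigit():
--                     j += 1
--                 dig = int(x[i + 1:j])
--                 if dig > 0:
--                     prev = x[i - 1]
--                     counts[prev] = counts.get(prev, 0) + dig
--         for i, ch in enumerate(x):
--             if ch.isalpha() and (i + 1 == n or x[i + 1] != "^"):
--                 counts[ch] = counts.get(ch, 0) + 1
--     else:
--         for ch in x:
--             counts[ch] = counts.get(ch, 0) + 1
--     return counts
-- ===== Notes on version B (the rewrite author's own statement) =====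
-- stated objective: faster
-- what changed: B tallies counts directly into one dict in a single scan (each digit run adds to one count in O(1)) instead of A's materialising the run-length-expanded string character by character and then re-scanning that whole expanded string once per distinct character.
import Mathlib
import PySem

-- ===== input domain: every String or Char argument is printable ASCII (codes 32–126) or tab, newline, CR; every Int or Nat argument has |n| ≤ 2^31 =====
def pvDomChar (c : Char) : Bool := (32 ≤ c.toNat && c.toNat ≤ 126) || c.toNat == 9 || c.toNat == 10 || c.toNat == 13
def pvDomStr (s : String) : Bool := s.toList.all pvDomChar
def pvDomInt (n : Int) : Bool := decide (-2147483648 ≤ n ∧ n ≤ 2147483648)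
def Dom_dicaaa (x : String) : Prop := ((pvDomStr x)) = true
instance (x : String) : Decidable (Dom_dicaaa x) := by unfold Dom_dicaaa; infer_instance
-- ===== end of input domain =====

-- B tallies run-lengths straight into a dict instead of materialising the expanded
-- string and re-scanning it once per distinct character (objective: faster).

-- ===== PORT A =====

-- A's inner `while m+1<len(x): if x[m+1].isdigit(): m=m+1 else: break`
def hatRunEnd (l : List Char) (m : Int) : Int :=
  if m + 1 < (l.length : Int) then
    if PySem.Chars.isdigit (PySem.List.pyGetD l (m + 1) ' ') then hatRunEnd l (m + 1) else m
  else m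
termination_by ((l.length : Int) - m).toNat
decreasing_by omega

-- the helper `a(x)`, returned as its list of characters (only its characters are consumed)
def aChars (x : String) : List Char :=
  if PySem.Str.isIn "^" x then
    let l := x.toList
    -- lst = positions of '^'
    let lst : List Int := (PySem.List.enumerate l).foldl
      (fun acc p => if p.2 == '^' then acc ++ [p.1] else acc) []
    -- for i in lst: expand
    let c1 : List Char := lst.foldl (fun c i =>
      let m := hatRunEnd l i
      let dig : Int := (PySem.Int.ofChars? (PySem.List.slice l (some (i + 1)) (some (m + 1)))).getD 0
      (PySem.List.pyRange 0 dig 1).foldl (fun c _ => c ++ [PySem.List.pyGetD l (i - 1) ' ']) c) []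
    -- for i in range(len(x)): keep letters not followed by '^'
    (PySem.List.pyRange 0 (l.length : Int) 1).foldl (fun c i =>
      let tf : Bool :=
        if i + 1 = (l.length : Int) then true
        else if PySem.List.pyGetD l (i + 1) ' ' != '^' then true
        else false
      if PySem.Chars.isalpha (PySem.List.pyGetD l i ' ') && tf then
        c ++ [PySem.List.pyGetD l i ' ']
      else c) c1
  else x.toList

def dicaaa (x : String) : List (String × Int) :=
  let c := aChars x
  let a := PySem.Set.ofList c
  let dic : PySem.Dict String Int := a.foldl (fun d i =>
    let d := d.insert i.toString 0
    c.foldl (fun d b =>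
      if b == i then d.insert i.toString (d.getD i.toString 0 + 1) else d) d) PySem.Dict.empty
  let _sss : String := a.foldl (fun s i =>
    if dic.getD i.toString 0 == 1 then s ++ i.toString
    else s ++ i.toString ++ "^" ++ PySem.Int.toStr (dic.getD i.toString 0)) ""
  dic.items

-- ===== PORT B =====

-- B's inner `while j < n and x[j].isdigit(): j += 1`
def bRunEnd (l : List Char) (j : Int) : Int :=
  if j < (l.length : Int) then
    if PySem.Chars.isdigit (PySem.List.pyGetD l j ' ') then bRunEnd l (j + 1) else j
  else j
termination_by ((l.length : Int) - j).toNat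
decreasing_by omega

def dicaaa_alt (x : String) : List (String × Int) :=
  let l := x.toList
  let counts : PySem.Dict String Int :=
    if PySem.Str.isIn "^" x then
      let d1 := (PySem.List.enumerate l).foldl (fun d p =>
        if p.2 == '^' then
          let j := bRunEnd l (p.1 + 1)
          let dig : Int := (PySem.Int.ofChars? (PySem.List.slice l (some (p.1 + 1)) (some j))).getD 0
          if 0 < dig then
            let prev := PySem.List.pyGetD l (p.1 - 1) ' '
            d.insert prev.toString (d.getD prev.toString 0 + dig)
          else d
        else d) PySem.Dict.empty
      (PySem.List.enumerate l).foldl (fun d p =>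
        if PySem.Chars.isalpha p.2 &&
            (decide (p.1 + 1 = (l.length : Int)) || (PySem.List.pyGetD l (p.1 + 1) ' ' != '^')) then
          d.insert p.2.toString (d.getD p.2.toString 0 + 1)
        else d) d1
    else
      l.foldl (fun d ch => d.insert ch.toString (d.getD ch.toString 0 + 1)) PySem.Dict.empty
  counts.items

-- ===== PRECONDITION & SPEC =====
-- Pre_ excludes exactly the inputs on which A raises ValueError: a caret that is not
-- immediately followed by a decimal digit makes A parse an empty digit run with int.
-- (The Lean ports totalise that parse with getD 0 identically, so the equality proof
-- happens to hold without Pre_; Pre_ is stated because the Pythons raise there.)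
def Pre_dicaaa (x : String) : Prop :=
  ∀ k, k < x.toList.length → x.toList[k]! = '^' →
    k + 1 < x.toList.length ∧ PySem.Chars.isdigit (x.toList[k + 1]!) = true
instance (x : String) : Decidable (Pre_dicaaa x) := by unfold Pre_dicaaa; infer_instance

def pvWitness_dicaaa : String := "ab^3c^10d"

def Spec_dicaaa (x : String) (out : List (String × Int)) : Prop := out = dicaaa_alt x
instance (x : String) (out : List (String × Int)) : Decidable (Spec_dicaaa x out) := by unfold Spec_dicaaa; infer_instance

-- ===== CLAIM (what is proved, stated in full; the proofs are below) =====
def Claim_equal_dicaaa : Prop := ∀ (x : String), Dom_dicaaa x → Pre_dicaaa x → Spec_dicaaa x (dicaaa x)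

-- ===== LEMMAS AND PROOFS =====

-- proof-side helpers -------------------------------------------------------

-- one tally step: add `p.2` to the count of `p.1`
def addD (d : PySem.Dict String Int) (p : Char × Int) : PySem.Dict String Int :=
  d.insert p.1.toString (d.getD p.1.toString 0 + p.2)

-- the character sequence an entry list abbreviates
def flattenE (s : List (Char × Int)) : List Char :=
  s.flatMap (fun p => List.replicate p.2.toNat p.1)

-- the item list "first-occurrence keys with their counts in m"
def canonI (m : List Char) : List (String × Int) :=
  (PySem.Set.ofList m).map (fun i => (i.toString, (m.count i : Int)))

def hatIdx (l : List Char) : List Int :=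
  ((PySem.List.enumerate l).filter (fun p => p.2 == '^')).map (·.1)

def entA (l : List Char) (i : Int) : Char × Int :=
  (PySem.List.pyGetD l (i - 1) ' ',
   (PySem.Int.ofChars? (PySem.List.slice l (some (i + 1)) (some (hatRunEnd l i + 1)))).getD 0)

def letterKeep (l : List Char) (i : Int) : Bool :=
  PySem.Chars.isalpha (PySem.List.pyGetD l i ' ') &&
    (decide (i + 1 = (l.length : Int)) || (PySem.List.pyGetD l (i + 1) ' ' != '^'))

def lettersL (l : List Char) : List Char :=
  ((PySem.List.pyRange 0 (l.length : Int) 1).filter (letterKeep l)).map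
    (fun i => PySem.List.pyGetD l i ' ')

-- generic facts -------------------------------------------------------------

lemma update_replicate_mem {s : PySem.Set Char} {ch : Char} (h : ch ∈ s) (k : Nat) :
    s.update (List.replicate k ch) = s := by
  induction k with
  | zero => rfl
  | succ k ih =>
      rw [List.replicate_succ, PySem.Set.update_cons, PySem.Set.add_of_mem h]
      exact ih

lemma update_replicate_not_mem {s : PySem.Set Char} {ch : Char} (h : ch ∉ s) {k : Nat}
    (hk : k ≠ 0) : s.update (List.replicate k ch) = s ++ [ch] := by
  obtain ⟨k, rfl⟩ := Nat.exists_eq_succ_of_ne_zero hk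
  rw [List.replicate_succ, PySem.Set.update_cons, PySem.Set.add_of_not_mem h]
  exact update_replicate_mem (by simp) k

lemma char_toString_inj : Function.Injective Char.toString := by
  intro a b h
  have := congrArg String.toList h
  simpa using this



lemma mem_keys_canon {T : PySem.Dict String Int} {m : List Char}
    (hI : T.items = canonI m) (ch : Char) : ch.toString ∈ T.keys ↔ ch ∈ m := by
  have hk : T.keys = (PySem.Set.ofList m).map Char.toString := by
    simp only [PySem.Dict.keys, hI, canonI, List.map_map]
    rfl
  rw [hk]
  constructor
  · rintro hmem
    rcases List.mem_map.1 hmem with ⟨i, hi, he⟩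
    exact char_toString_inj he ▸ (PySem.Set.mem_ofList m i).1 hi
  · intro hm
    exact List.mem_map_of_mem ((PySem.Set.mem_ofList m ch).2 hm)

lemma getD_canon {T : PySem.Dict String Int} {m : List Char}
    (hI : T.items = canonI m) (hN : T.keys.Nodup) (ch : Char) :
    T.getD ch.toString 0 = (m.count ch : Int) := by
  by_cases hm : ch ∈ m
  · have hmem : (ch.toString, (m.count ch : Int)) ∈ T.items := by
      rw [hI]
      exact List.mem_map_of_mem ((PySem.Set.mem_ofList m ch).2 hm)
    exact PySem.Dict.getD_of_mem_items T hmem hN 0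
  · have h0 : m.count ch = 0 := List.count_eq_zero.2 hm
    have : T.get? ch.toString = none :=
      (PySem.Dict.get?_eq_none_iff_not_mem_keys T _).2 (fun hc => hm ((mem_keys_canon hI ch).1 hc))
    rw [PySem.Dict.getD_of_get?_eq_none T 0 this, h0]
    simp

lemma tally_nodup (s : List (Char × Int)) :
    ((s.foldl addD PySem.Dict.empty)).keys.Nodup := by
  unfold addD
  exact PySem.Dict.nodup_keys_foldl_insert_key s (fun p => p.1.toString)
    (fun d p => d.getD p.1.toString 0 + p.2) PySem.Dict.empty PySem.Dict.nodup_keys_empty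

lemma tally_items (s : List (Char × Int)) (h : ∀ p ∈ s, 0 < p.2) :
    (s.foldl addD PySem.Dict.empty).items = canonI (flattenE s) := by
  induction s using List.reverseRecOn with
  | nil => simp [flattenE, canonI, PySem.Set.ofList]; rfl
  | append_singleton s p ih =>
      have hp : 0 < p.2 := h p (by simp)
      have hs : ∀ q ∈ s, 0 < q.2 := fun q hq => h q (by simp [hq])
      have ihi := ih hs
      have hN := tally_nodup s
      set T := s.foldl addD PySem.Dict.empty with hT
      set m := flattenE s with hm
      have hflat : flattenE (s ++ [p]) = m ++ List.replicate p.2.toNat p.1 := by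
        simp [flattenE, hm]
      rw [List.foldl_append]
      show (addD T p).items = canonI (flattenE (s ++ [p]))
      rw [hflat]
      unfold addD
      rw [getD_canon ihi hN p.1]
      by_cases hmem : p.1 ∈ m
      · have hc : T.contains p.1.toString = true :=
          (PySem.Dict.contains_iff_mem_keys T _).2 ((mem_keys_canon ihi p.1).2 hmem)
        rw [PySem.Dict.items_insert_of_contains T _ hc, ihi]
        unfold canonI
        rw [PySem.Set.ofList_append, update_replicate_mem ((PySem.Set.mem_ofList m p.1).2 hmem)]
        rw [List.map_map]
        apply List.map_congr_left
        intro i hi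
        simp only [Function.comp]
        by_cases hie : i = p.1
        · subst hie
          simp [List.count_append]
          omega
        · have hsing : ¬ String.singleton i = String.singleton p.1 :=
            fun hh => hie (by simpa using congrArg String.toList hh)
          simp [List.count_append, List.count_replicate, hsing, Ne.symm hie]
      · have hc : T.contains p.1.toString = false := by
          by_contra hcc
          have := (PySem.Dict.contains_iff_mem_keys T _).1 (by simpa using Bool.of_not_eq_false hcc)
          exact hmem ((mem_keys_canon ihi p.1).1 this)
        have h0 : m.count p.1 = 0 := List.count_eq_zero.2 hmem
        rw [PySem.Dict.items_insert_of_not_contains T _ hc, ihi]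
        unfold canonI
        rw [PySem.Set.ofList_append,
            update_replicate_not_mem (fun hh => hmem ((PySem.Set.mem_ofList m p.1).1 hh))
              (by omega)]
        rw [List.map_append]
        congr 1
        · apply List.map_congr_left
          intro i hi
          have hie : i ≠ p.1 := fun hh => hmem ((PySem.Set.mem_ofList m p.1).1 (hh ▸ hi))
          have hsing : ¬ String.singleton i = String.singleton p.1 :=
            fun hh => hie (by simpa using congrArg String.toList hh)
          simp [List.count_append, List.count_replicate, Ne.symm hie]
        · simp [List.count_append, List.count_replicate, h0]
          omega


-- A's dictionary -----------------------------------------------------------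

lemma insert_getD_self (d : PySem.Dict String Int) (s : String)
    (hc : d.contains s = true) (hn : d.keys.Nodup) :
    d.insert s (d.getD s 0) = d := by
  apply PySem.Dict.ext
  rw [PySem.Dict.items_insert_of_contains d _ hc]
  have : ∀ p ∈ d.items, (if (p.1 == s) = true then (s, d.getD s 0) else p) = p := by
    rintro ⟨k, v⟩ hp
    by_cases hk : k = s
    · subst hk
      simp [PySem.Dict.getD_of_mem_items d hp hn 0]
    · simp [hk]
  rw [List.map_congr_left this, List.map_id']

lemma innerA (i : Char) (sKey : String) (c : List Char) :
    ∀ (d : PySem.Dict String Int), d.contains sKey = true → d.keys.Nodup →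
      c.foldl (fun d b => if b == i then d.insert sKey (d.getD sKey 0 + 1) else d) d
        = d.insert sKey (d.getD sKey 0 + (c.count i : Int)) := by
  induction c with
  | nil =>
      intro d hc hn
      simpa using (insert_getD_self d sKey hc hn).symm
  | cons b c ih =>
      intro d hc hn
      cases hb : (b == i) with
      | true =>
          simp only [List.foldl_cons, hb, if_pos]
          rw [ih _ (PySem.Dict.contains_insert_self d sKey _)
                (PySem.Dict.nodup_keys_insert d sKey _ hn)]
          rw [PySem.Dict.getD_insert_self, PySem.Dict.insert_insert_self]
          rw [List.count_cons, hb]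
          congr 1
          simp
          ring
      | false =>
          simp only [List.foldl_cons, hb, Bool.false_eq_true, if_false]
          rw [ih _ hc hn, List.count_cons, hb]
          simp

lemma outerA (c : List Char) (a : List Char) :
    ∀ (d : PySem.Dict String Int), d.keys.Nodup →
      a.foldl (fun d i =>
          c.foldl (fun d b => if b == i then d.insert i.toString (d.getD i.toString 0 + 1) else d)
            (d.insert i.toString 0)) d
        = a.foldl (fun d i => d.insert i.toString ((c.count i : Int))) d := by
  induction a with
  | nil => intro d _; rfl
  | cons i a ih =>
      intro d hn
      simp only [List.foldl_cons]
      rw [innerA i i.toString c _ (PySem.Dict.contains_insert_self d i.toString 0)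
            (PySem.Dict.nodup_keys_insert d i.toString 0 hn)]
      rw [PySem.Dict.getD_insert_self, PySem.Dict.insert_insert_self, zero_add]
      exact ih _ (PySem.Dict.nodup_keys_insert d i.toString _ hn)

lemma A_items (x : String) : dicaaa x = canonI (aChars x) := by
  show (List.foldl (fun d i =>
      List.foldl (fun d b => if b == i then d.insert i.toString (d.getD i.toString 0 + 1) else d)
        (d.insert i.toString 0) (aChars x))
      PySem.Dict.empty (PySem.Set.ofList (aChars x))).items = canonI (aChars x)
  rw [outerA (aChars x) (PySem.Set.ofList (aChars x)) PySem.Dict.empty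
        PySem.Dict.nodup_keys_empty]
  rw [PySem.Dict.items_foldl_insert_fresh (PySem.Set.ofList (aChars x)) Char.toString
        (fun i => ((aChars x).count i : Int)) PySem.Dict.empty
        (fun a _ => by simp) ((PySem.Set.nodup_ofList _).map char_toString_inj)]
  simp [canonI]
  rfl


-- A's expansion as an entry list -------------------------------------------

lemma runEnd_agree (l : List Char) (m : Int) : bRunEnd l (m + 1) = hatRunEnd l m + 1 := by
  fun_induction hatRunEnd l m with
  | case1 m h1 h2 ih =>
      rw [bRunEnd, if_pos (by omega), if_pos h2]
      exact ih
  | case2 m h1 h2 =>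
      rw [bRunEnd, if_pos (by omega), if_neg h2]
  | case3 m h1 =>
      rw [bRunEnd, if_neg (by omega)]

lemma c1_shape (l : List Char) (lst : List Int) :
    lst.foldl (fun c i =>
      let m := hatRunEnd l i
      let dig : Int := (PySem.Int.ofChars? (PySem.List.slice l (some (i + 1)) (some (m + 1)))).getD 0
      (PySem.List.pyRange 0 dig 1).foldl (fun c _ => c ++ [PySem.List.pyGetD l (i - 1) ' ']) c) []
    = flattenE (lst.map (entA l)) := by
  rw [PySem.List.foldl_congr_mem lst _
        (fun c i => c ++ List.replicate (entA l i).2.toNat (entA l i).1) []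
        (fun c i _ => by
          show (PySem.List.pyRange 0 (entA l i).2 1).foldl
              (fun c _ => c ++ [PySem.List.pyGetD l (i - 1) ' ']) c = _
          rw [PySem.List.foldl_append_singleton_eq_map, List.map_const',
              PySem.List.length_pyRange_one]
          show c ++ List.replicate ((entA l i).2 - 0).toNat (entA l i).1 = _
          rw [sub_zero])]
  rw [PySem.List.foldl_append_eq_flatMap, flattenE, List.flatMap_map]
  rfl

lemma aChars_hat (x : String) (h : PySem.Str.isIn "^" x = true) :
    aChars x = flattenE ((hatIdx x.toList).map (entA x.toList)) ++ lettersL x.toList := by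
  unfold aChars
  rw [if_pos h]
  show (PySem.List.pyRange 0 (x.toList.length : Int) 1).foldl _
      (((PySem.List.enumerate x.toList).foldl
        (fun acc p => if p.2 == '^' then acc ++ [p.1] else acc) []).foldl _ []) = _
  rw [PySem.List.foldl_append_if]
  congr 1
  · rw [PySem.List.foldl_append_if, List.nil_append]
    exact c1_shape x.toList _
  · have hpred : (fun i => PySem.Chars.isalpha (PySem.List.pyGetD x.toList i ' ') &&
        (if i + 1 = (x.toList.length : Int) then true
         else if PySem.List.pyGetD x.toList (i + 1) ' ' != '^' then true else false))
        = letterKeep x.toList := by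
      funext i
      unfold letterKeep
      congr 1
      split_ifs <;> simp_all
    rw [lettersL, hpred]


-- B's dictionary -----------------------------------------------------------

lemma flattenE_append (a b : List (Char × Int)) :
    flattenE (a ++ b) = flattenE a ++ flattenE b := by
  simp [flattenE]

lemma flattenE_filter_pos (s : List (Char × Int)) :
    flattenE (s.filter (fun p => decide (0 < p.2))) = flattenE s := by
  induction s with
  | nil => rfl
  | cons p s ih =>
      by_cases hp : 0 < p.2
      · simp [flattenE, hp] at ih ⊢; exact ih
      · have h0 : p.2.toNat = 0 := by omega
        simp [flattenE, hp, h0] at ih ⊢; exact ih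

lemma flattenE_units (m : List Char) :
    flattenE (m.map (fun ch => (ch, (1 : Int)))) = m := by
  induction m with
  | nil => rfl
  | cons c m ih => simp [flattenE] at ih ⊢; simpa [List.replicate] using ih

lemma B1 (l : List Char) :
    (PySem.List.enumerate l).foldl (fun d p =>
        if p.2 == '^' then
          let j := bRunEnd l (p.1 + 1)
          let dig : Int := (PySem.Int.ofChars? (PySem.List.slice l (some (p.1 + 1)) (some j))).getD 0
          if 0 < dig then
            let prev := PySem.List.pyGetD l (p.1 - 1) ' '
            d.insert prev.toString (d.getD prev.toString 0 + dig)
          else d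
        else d) PySem.Dict.empty
    = (((hatIdx l).map (entA l)).filter (fun p => decide (0 < p.2))).foldl addD
        PySem.Dict.empty := by
  rw [← List.foldl_filter]
  show (List.filter (fun p => p.2 == '^') (PySem.List.enumerate l)).foldl
      (fun d (p : Int × Char) =>
        if 0 < ((PySem.Int.ofChars? (PySem.List.slice l (some (p.1 + 1))
            (some (bRunEnd l (p.1 + 1))))).getD 0 : Int) then
          addD d (PySem.List.pyGetD l (p.1 - 1) ' ',
            (PySem.Int.ofChars? (PySem.List.slice l (some (p.1 + 1))
              (some (bRunEnd l (p.1 + 1))))).getD 0)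
        else d) PySem.Dict.empty = _
  rw [← List.foldl_map (f := fun p : Int × Char => p.1)
        (g := fun d i =>
          if 0 < ((PySem.Int.ofChars? (PySem.List.slice l (some (i + 1))
              (some (bRunEnd l (i + 1))))).getD 0 : Int) then
            addD d (PySem.List.pyGetD l (i - 1) ' ',
              (PySem.Int.ofChars? (PySem.List.slice l (some (i + 1))
                (some (bRunEnd l (i + 1))))).getD 0)
          else d)]
  rw [show ((PySem.List.enumerate l).filter (fun p => p.2 == '^')).map (fun p : Int × Char => p.1)
        = hatIdx l from rfl]
  rw [PySem.List.foldl_congr_mem (hatIdx l) _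
        (fun d i => if 0 < (entA l i).2 then addD d (entA l i) else d) PySem.Dict.empty
        (fun d i _ => by simp only [runEnd_agree, entA])]
  rw [← List.foldl_map (f := entA l)
        (g := fun d e => if 0 < e.2 then addD d e else d)]
  rw [PySem.List.foldl_congr_mem _ _
        (fun d e => if decide (0 < e.2) = true then addD d e else d) PySem.Dict.empty
        (fun d e _ => by simp)]
  rw [← List.foldl_filter]

lemma B2 (l : List Char) (d0 : PySem.Dict String Int) :
    (PySem.List.enumerate l).foldl (fun d p =>
        if PySem.Chars.isalpha p.2 &&
            (decide (p.1 + 1 = (l.length : Int)) || (PySem.List.pyGetD l (p.1 + 1) ' ' != '^')) then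
          d.insert p.2.toString (d.getD p.2.toString 0 + 1)
        else d) d0
    = ((lettersL l).map (fun ch => (ch, (1 : Int)))).foldl addD d0 := by
  rw [PySem.List.enumerate_eq_map_pyRange l ' ']
  rw [List.foldl_map]
  rw [PySem.List.foldl_congr_mem _ _
        (fun d j => if letterKeep l j = true then addD d (PySem.List.pyGetD l j ' ', 1) else d) d0
        (fun d j _ => by rfl)]
  rw [← List.foldl_filter]
  rw [← List.foldl_map (f := fun j => PySem.List.pyGetD l j ' ')
        (g := fun d ch => addD d (ch, (1 : Int)))]
  rw [← List.foldl_map (f := fun ch => (ch, (1 : Int))) (g := addD)]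
  rfl

lemma B_eq_tally (x : String) :
    dicaaa_alt x =
      (if PySem.Str.isIn "^" x then
        ((((hatIdx x.toList).map (entA x.toList)).filter (fun p => decide (0 < p.2)))
          ++ (lettersL x.toList).map (fun ch => (ch, (1 : Int)))).foldl addD PySem.Dict.empty
      else ((x.toList.map (fun ch => (ch, (1 : Int)))).foldl addD PySem.Dict.empty)).items := by
  simp only [dicaaa_alt]
  by_cases h : PySem.Str.isIn "^" x = true
  · rw [if_pos h, if_pos h]
    congr 1
    rw [List.foldl_append]
    show (PySem.List.enumerate x.toList).foldl _
        ((PySem.List.enumerate x.toList).foldl _ PySem.Dict.empty) = _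
    rw [B1, B2]
  · rw [if_neg h, if_neg h]
    congr 1
    show x.toList.foldl (fun d ch => addD d (ch, (1 : Int))) PySem.Dict.empty = _
    rw [← List.foldl_map (f := fun ch => (ch, (1 : Int))) (g := addD)]


-- ===== VERDICT (by name: the statement is the Claim_ definition above) =====
theorem dicaaa_spec : Claim_equal_dicaaa := by
  unfold Claim_equal_dicaaa
  intro x _ _
  show dicaaa x = dicaaa_alt x
  rw [A_items, B_eq_tally]
  by_cases h : PySem.Str.isIn "^" x = true
  · rw [if_pos h, aChars_hat x h, tally_items]
    · rw [flattenE_append, flattenE_filter_pos, flattenE_units]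
    · intro p hp
      rcases List.mem_append.1 hp with hp | hp
      · simpa using (List.of_mem_filter hp)
      · rcases List.mem_map.1 hp with ⟨c, _, rfl⟩; norm_num
  · rw [if_neg h]
    have hx : aChars x = x.toList := by
      unfold aChars
      rw [if_neg h]
    rw [hx, tally_items]
    · rw [flattenE_units]
    · intro p hp
      rcases List.mem_map.1 hp with ⟨c, _, rfl⟩; norm_num
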